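-- pv_equiv track=rewrite | github.com/HeroKillerEver/LeetCode | 717-bit-characters/solution.py | isOneBitCharacter_1
-- ===== SOURCE A (Python) =====
-- from collections import deque
--
-- def isOneBitCharacter_1(bits):
--     """
--     :type bits: List[int]
--     :rtype: bool
--     """
--     """
--     using queue
--     time complexity: O(n)
--     space complexity: O(n)
--     """
--     bits_queue = deque(bits)
--     while len(bits_queue) > 1:
--         if bits_queue[0]:
--             bits_queue.popleft()
--             bits_queue.popleft()
--         else:
--             bits_queue.popleft()
--     return bits_queue == deque([0])
-- ===== SOURCE B (Python) =====
-- def isOneBitCharacter_1(bits):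
--     # Backward scan: last element must be 0, then the answer is the parity
--     # of the run of consecutive nonzero entries just before it.
--     if not bits or bits[-1] != 0:
--         return False
--     i = len(bits) - 2
--     ones = 0
--     while i >= 0 and bits[i] != 0:
--         ones += 1
--         i -= 1
--     return ones % 2 == 0
-- ===== Notes on version B (the rewrite author's own statement) =====
-- stated objective: simpler
-- what changed: Replaces the forward deque simulation with a backward scan that only checks the last element is 0 and the parity of the run of nonzero entries before it.
import Mathlib
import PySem

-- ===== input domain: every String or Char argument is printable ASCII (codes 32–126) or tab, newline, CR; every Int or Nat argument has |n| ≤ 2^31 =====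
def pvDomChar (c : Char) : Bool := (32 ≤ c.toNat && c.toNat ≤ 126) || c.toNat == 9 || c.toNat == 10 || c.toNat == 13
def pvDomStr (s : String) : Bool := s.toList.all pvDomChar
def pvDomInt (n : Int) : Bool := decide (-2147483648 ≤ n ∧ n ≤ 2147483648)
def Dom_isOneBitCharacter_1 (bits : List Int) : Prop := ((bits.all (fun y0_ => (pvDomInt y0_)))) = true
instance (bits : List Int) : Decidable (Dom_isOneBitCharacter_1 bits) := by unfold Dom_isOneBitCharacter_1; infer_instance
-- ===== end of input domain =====

-- B replaces A's forward deque simulation with a backward parity scan (simpler, O(1) space).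


-- ===== PORT A =====
-- the while loop over the deque: while len > 1, pop two if head truthy else pop one
def pvALoop : List Int → List Int
  | x :: y :: rest => if x ≠ 0 then pvALoop rest else pvALoop (y :: rest)
  | l => l

def isOneBitCharacter_1 (bits : List Int) : Bool := pvALoop bits == [0]

-- ===== PORT B =====
-- the backward index walk `while i >= 0 and bits[i] != 0: ones += 1` is ported as a
-- recursion over the reversed list: length of the leading run of nonzero entries
def pvCountOnes : List Int → Nat
  | [] => 0
  | x :: rest => if x ≠ 0 then pvCountOnes rest + 1 else 0

def pvBScan : List Int → Bool
  | [] => false                                   -- `if not bits: return False`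
  | x :: rest =>                                  -- x = bits[-1]
    if x ≠ 0 then false                           -- `if bits[-1] != 0: return False`
    else pvCountOnes rest % 2 == 0                -- `return ones % 2 == 0`

def isOneBitCharacter_1_alt (bits : List Int) : Bool := pvBScan bits.reverse

-- ===== PRECONDITION & SPEC =====
def Spec_isOneBitCharacter_1 (bits : List Int) (out : Bool) : Prop := out = isOneBitCharacter_1_alt bits
instance (bits : List Int) (out : Bool) : Decidable (Spec_isOneBitCharacter_1 bits out) := by unfold Spec_isOneBitCharacter_1; infer_instance

-- ===== CLAIM (what is proved, stated in full; the proofs are below) =====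
def Claim_equal_isOneBitCharacter_1 : Prop := ∀ (bits : List Int), Dom_isOneBitCharacter_1 bits → Spec_isOneBitCharacter_1 bits (isOneBitCharacter_1 bits)

-- ===== LEMMAS AND PROOFS =====

theorem pvCountOnes_skip_zero (l : List Int) (y : Int) :
    pvCountOnes (l ++ [y, 0]) = pvCountOnes (l ++ [y]) := by
  induction l with
  | nil => by_cases hy : y = 0 <;> simp [pvCountOnes, hy]
  | cons a l ih => by_cases ha : a = 0 <;> simp [pvCountOnes, ha, ih]

theorem pvCountOnes_drop_two (l : List Int) (y x : Int) (hx : x ≠ 0) :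
    pvCountOnes (l ++ [y, x]) % 2 = pvCountOnes l % 2 := by
  induction l with
  | nil => by_cases hy : y = 0 <;> simp [pvCountOnes, hy, hx]
  | cons a l ih =>
    by_cases ha : a = 0
    · simp [pvCountOnes, ha]
    · simp only [List.cons_append, pvCountOnes, if_pos ha]
      omega

theorem pvBScan_skip_zero (l : List Int) (y : Int) :
    pvBScan (l ++ [y, 0]) = pvBScan (l ++ [y]) := by
  cases l with
  | nil => by_cases hy : y = 0 <;> simp [pvBScan, pvCountOnes, hy]
  | cons a l =>
    by_cases ha : a = 0 <;>
      simp [pvBScan, ha, pvCountOnes_skip_zero]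

theorem pvBScan_drop_two (l : List Int) (y x : Int) (hx : x ≠ 0) :
    pvBScan (l ++ [y, x]) = pvBScan l := by
  cases l with
  | nil => by_cases hy : y = 0 <;> simp [pvBScan, pvCountOnes, hy, hx]
  | cons a l =>
    by_cases ha : a = 0 <;>
      simp [pvBScan, ha, pvCountOnes_drop_two _ _ _ hx]

theorem pvALoop_eq_bScan (bits : List Int) :
    (pvALoop bits == [0]) = pvBScan bits.reverse := by
  induction bits using pvALoop.induct with
  | case1 x y rest hx ih =>
    rw [pvALoop, if_pos hx]
    simpa [pvBScan_drop_two _ _ _ hx] using ih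
  | case2 x y rest hx ih =>
    have hx0 : x = 0 := by by_contra h; exact hx h
    subst hx0
    rw [pvALoop, if_neg hx]
    simpa [pvBScan_skip_zero] using ih
  | case3 l h =>
    cases l with
    | nil => simp [pvALoop, pvBScan]
    | cons x t =>
      cases t with
      | nil => by_cases hx : x = 0 <;> simp [pvALoop, pvBScan, pvCountOnes, hx]
      | cons y r => exact absurd rfl (h x y r)

-- ===== VERDICT (by name: the statement is the Claim_ definition above) =====
theorem isOneBitCharacter_1_spec : Claim_equal_isOneBitCharacter_1 := by
  intro bits _
  unfold Spec_isOneBitCharacter_1 isOneBitCharacter_1 isOneBitCharacter_1_alt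
  exact pvALoop_eq_bScan bits
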